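-- pv_equiv track=rewrite | github.com/juliajaniak/Python-uniwersytet | zad2.py | wykonaj_klucz
-- ===== SOURCE A (Python) =====
-- def wykonaj_klucz(klucz):
--     if not klucz or len(klucz) > len(set(klucz)) or len(klucz)%2 == 1:
--        raise ValueError('nieprawidłowy klucz.')
--
--     słownik={}
--     for k,v in enumerate(klucz):
--         if k%2 == 0:
--             słownik[v] = klucz[k+1]
--         else:
--             słownik[v] = klucz[k-1]
--
--     return słownik
-- ===== SOURCE B (Python) =====
-- def wykonaj_klucz(klucz):
--     if not klucz or len(klucz) > len(set(klucz)) or len(klucz)%2 == 1: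
--        raise ValueError('nieprawidłowy klucz.')
--
--     evens, odds = klucz[0::2], klucz[1::2]
--     partner = dict(zip(evens, odds))
--     partner.update(zip(odds, evens))
--     return {c: partner[c] for c in klucz}
-- ===== Notes on version B (the rewrite author's own statement) =====
-- stated objective: alternative
-- what changed: B keeps the validation guard but replaces A's enumerate-over-every-index loop with its parity branch and klucz[k+1]/klucz[k-1] lookups by staged passes: slice the key into evens/odds (klucz[0::2], klucz[1::2]), build a partner dict from the two zips, then emit {c: partner[c] for c in klucz}.
import Mathlib
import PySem

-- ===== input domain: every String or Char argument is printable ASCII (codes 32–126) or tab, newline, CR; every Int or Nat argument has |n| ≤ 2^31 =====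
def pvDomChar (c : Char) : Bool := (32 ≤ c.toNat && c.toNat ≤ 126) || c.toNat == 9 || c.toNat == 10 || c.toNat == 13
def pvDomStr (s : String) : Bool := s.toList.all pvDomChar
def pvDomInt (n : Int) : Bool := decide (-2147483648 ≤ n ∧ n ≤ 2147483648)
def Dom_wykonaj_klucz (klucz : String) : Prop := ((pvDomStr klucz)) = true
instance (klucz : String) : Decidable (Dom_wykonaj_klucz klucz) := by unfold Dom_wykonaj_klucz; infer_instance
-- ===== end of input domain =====

-- B replaces A's enumerate-every-index loop (parity branch + klucz[k±1] lookups) by staged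
-- passes: slice the key into even/odd characters, build a partner dict from the two zips,
-- then emit {c: partner[c] for c in klucz}; objective: alternative (same O(n) cost).

-- ===== PORT A =====
-- A: enumerate every index k; even k inserts klucz[k] ↦ klucz[k+1], odd k inserts klucz[k] ↦ klucz[k-1].
-- pyGet? = none (IndexError) cannot occur past the guard; returning d there only totalizes the port.
def wykonaj_klucz (klucz : String) : List (String × String) :=
  let cs := klucz.toList
  if cs.length = 0 ∨ (PySem.Set.ofList cs).length < cs.length ∨ cs.length % 2 = 1 then
    []  -- Python raises ValueError here; excluded by Pre_
  else
    ((PySem.List.enumerate cs 0).foldl (fun d kv =>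
      if PySem.Int.mod kv.1 2 = 0 then
        match PySem.List.pyGet? cs (kv.1 + 1) with
        | some c => d.insert (String.ofList [kv.2]) (String.ofList [c])
        | none => d
      else
        match PySem.List.pyGet? cs (kv.1 - 1) with
        | some c => d.insert (String.ofList [kv.2]) (String.ofList [c])
        | none => d) (PySem.Dict.empty : PySem.Dict String String)).items

-- ===== PORT B =====
-- hand port of the step-2 slice s[0::2] (indices 0,2,4,…); s[1::2] is pvStep2 of the tail.
-- exact: PySem.List.slice? has no char-level step lemmas, so the slice is transcribed directly.
def pvStep2 : List Char → List Char
  | [] => []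
  | [a] => [a]
  | a :: _ :: r => a :: pvStep2 r

-- B: evens/odds = klucz[0::2]/klucz[1::2]; partner = dict(zip(evens,odds)); partner.update(zip(odds,evens));
-- return {c: partner[c] for c in klucz}.  partner[c] KeyError (get? = none) cannot occur past the
-- guard; skipping the insert there only totalizes the port.
def wykonaj_klucz_alt (klucz : String) : List (String × String) :=
  let cs := klucz.toList
  if cs.length = 0 ∨ (PySem.Set.ofList cs).length < cs.length ∨ cs.length % 2 = 1 then
    []  -- Python raises ValueError here; excluded by Pre_
  else
    let evens := (pvStep2 cs).map (fun c => String.ofList [c])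
    let odds := (pvStep2 cs.tail).map (fun c => String.ofList [c])
    let partner := (PySem.Dict.ofList (evens.zip odds)).update (odds.zip evens)
    (cs.foldl (fun d c =>
      match partner.get? (String.ofList [c]) with
      | some v => d.insert (String.ofList [c]) v
      | none => d) (PySem.Dict.empty : PySem.Dict String String)).items

-- ===== PRECONDITION & SPEC =====
-- Pre_ excludes exactly the inputs on which A (and B) raise ValueError: the empty key,
-- a key with a repeated character, and a key of odd length.
def Pre_wykonaj_klucz (klucz : String) : Prop :=
  klucz.toList ≠ [] ∧ klucz.toList.Nodup ∧ klucz.toList.length % 2 = 0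
instance (klucz : String) : Decidable (Pre_wykonaj_klucz klucz) := by
  unfold Pre_wykonaj_klucz; infer_instance

def pvWitness_wykonaj_klucz : String := "abcd"

def Spec_wykonaj_klucz (klucz : String) (out : List (String × String)) : Prop := out = wykonaj_klucz_alt klucz
instance (klucz : String) (out : List (String × String)) : Decidable (Spec_wykonaj_klucz klucz out) := by unfold Spec_wykonaj_klucz; infer_instance

-- ===== CLAIM (what is proved, stated in full; the proofs are below) =====
def Claim_equal_wykonaj_klucz : Prop := ∀ (klucz : String), Dom_wykonaj_klucz klucz → Pre_wykonaj_klucz klucz → Spec_wykonaj_klucz klucz (wykonaj_klucz klucz)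

-- ===== LEMMAS AND PROOFS =====

-- shorthand used throughout the proofs: the one-character string
def pvS (c : Char) : String := String.ofList [c]

theorem pvS_inj {a b : Char} (h : pvS a = pvS b) : a = b := by
  have := congrArg String.toList h
  simpa [pvS] using this

-- the adjacent pairs of a list, two characters at a time
def pvCP : List Char → List (Char × Char)
  | a :: b :: r => (a, b) :: pvCP r
  | _ => []

-- the common normal form of both outputs: per pair, both swap entries in key order
def pvChunk (cs : List Char) : List (String × String) :=
  (pvCP cs).flatMap (fun p => [(pvS p.1, pvS p.2), (pvS p.2, pvS p.1)])

-- A's loop on paired state (intermediate form used only by the A-side proof)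
def pvPairLoop : List Char → PySem.Dict String String → PySem.Dict String String
  | a :: b :: rest, d =>
      pvPairLoop rest ((d.insert (pvS a) (pvS b)).insert (pvS b) (pvS a))
  | _, d => d

-- ---- A side ----

-- A's enumerate loop, restricted to a suffix 'part' of the full key starting at an even
-- position s, performs exactly the paired inserts of pvPairLoop.
theorem pvLoop_eq (n : Nat) : ∀ (part full : List Char) (s : Nat)
    (d : PySem.Dict String String), part.length ≤ n →
    full.drop s = part → part.length % 2 = 0 → s % 2 = 0 →
    (PySem.List.enumerate part (s : Int)).foldl (fun d kv =>
      if PySem.Int.mod kv.1 2 = 0 then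
        match PySem.List.pyGet? full (kv.1 + 1) with
        | some c => d.insert (String.ofList [kv.2]) (String.ofList [c])
        | none => d
      else
        match PySem.List.pyGet? full (kv.1 - 1) with
        | some c => d.insert (String.ofList [kv.2]) (String.ofList [c])
        | none => d) d = pvPairLoop part d := by
  induction n with
  | zero =>
      intro part full s d hn hdrop hlen hs
      have : part = [] := List.eq_nil_of_length_eq_zero (by omega)
      subst this
      simp [PySem.List.enumerate_nil, pvPairLoop]
  | succ n ih =>
      intro part full s d hn hdrop hlen hs
      match part with
      | [] => simp [PySem.List.enumerate_nil, pvPairLoop]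
      | [a] => simp at hlen
      | a :: b :: rest =>
        have hga : full[s]? = some a := by
          have h := (List.getElem?_drop (i := s) (j := 0) (xs := full)).symm
          rw [hdrop] at h
          simpa using h
        have hgb : full[s + 1]? = some b := by
          have h := (List.getElem?_drop (i := s) (j := 1) (xs := full)).symm
          rw [hdrop] at h
          simpa using h
        have hmod0 : PySem.Int.mod (s : Int) 2 = 0 := by
          rw [PySem.Int.mod_eq_emod_of_pos (by norm_num)]; omega
        have hmod1 : PySem.Int.mod ((s : Int) + 1) 2 = 1 := by
          rw [PySem.Int.mod_eq_emod_of_pos (by norm_num)]; omega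
        have hget1 : PySem.List.pyGet? full ((s : Int) + 1) = some b := by
          have h : ((s : Int) + 1) = ((s + 1 : Nat) : Int) := by push_cast; ring
          rw [h, PySem.List.pyGet?_natCast, hgb]
        have hget0 : PySem.List.pyGet? full ((s : Int) + 1 - 1) = some a := by
          have h : ((s : Int) + 1 - 1) = ((s : Nat) : Int) := by ring
          rw [h, PySem.List.pyGet?_natCast, hga]
        rw [PySem.List.enumerate_cons, PySem.List.enumerate_cons]
        simp only [List.foldl_cons, hmod0, hmod1, hget1, hget0, reduceIte]
        have hdrop2 : full.drop (s + 2) = rest := by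
          have h2 : (full.drop s).drop 2 = full.drop (s + 2) := List.drop_drop
          rw [hdrop] at h2
          simpa using h2.symm
        have hcast : ((s : Int) + 1 + 1) = ((s + 2 : Nat) : Int) := by push_cast; ring
        rw [hcast, ih rest full (s + 2) _ (by simp at hn ⊢; omega) hdrop2
          (by simp at hlen; omega) (by omega)]
        rfl

-- pvPairLoop over fresh distinct keys appends exactly pvChunk to the items
theorem pvPairLoop_items (cs : List Char) : ∀ (d : PySem.Dict String String),
    cs.Nodup → (∀ c ∈ cs, d.contains (pvS c) = false) →
    (pvPairLoop cs d).items = d.items ++ pvChunk cs := by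
  induction cs using pvStep2.induct with
  | case1 => intro d _ _; simp [pvPairLoop, pvChunk, pvCP]
  | case2 a => intro d _ _; simp [pvPairLoop, pvChunk, pvCP]
  | case3 a b r ih =>
    intro d hnd hfresh
    simp only [List.nodup_cons, List.mem_cons] at hnd
    obtain ⟨ha, hb, hr⟩ := hnd
    have hab : a ≠ b := fun h => ha (Or.inl h)
    have hca : d.contains (pvS a) = false := hfresh a (by simp)
    have hcb : d.contains (pvS b) = false := hfresh b (by simp)
    have hsba : (pvS b == pvS a) = false := by
      simp only [beq_eq_false_iff_ne, ne_eq]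
      exact fun h => hab (pvS_inj h).symm
    have hcb1 : (d.insert (pvS a) (pvS b)).contains (pvS b) = false := by
      rw [PySem.Dict.contains_insert, hsba, hcb]; rfl
    have hfresh' : ∀ c ∈ r, ((d.insert (pvS a) (pvS b)).insert (pvS b) (pvS a)).contains (pvS c) = false := by
      intro c hc
      have hcanb : c ≠ a ∧ c ≠ b := ⟨fun h => ha (Or.inr (h ▸ hc)), fun h => hb (h ▸ hc)⟩
      rw [PySem.Dict.contains_insert, PySem.Dict.contains_insert]
      have h1 : (pvS c == pvS b) = false := by
        simp only [beq_eq_false_iff_ne, ne_eq]; exact fun h => hcanb.2 (pvS_inj h)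
      have h2 : (pvS c == pvS a) = false := by
        simp only [beq_eq_false_iff_ne, ne_eq]; exact fun h => hcanb.1 (pvS_inj h)
      rw [h1, h2, hfresh c (by simp [hc])]; rfl
    have hstep : pvPairLoop (a :: b :: r) d
        = pvPairLoop r ((d.insert (pvS a) (pvS b)).insert (pvS b) (pvS a)) := rfl
    rw [hstep, ih _ hr hfresh',
      PySem.Dict.items_insert_of_not_contains _ _ hcb1,
      PySem.Dict.items_insert_of_not_contains _ _ hca]
    simp [pvChunk, pvCP]

-- ---- B side ----

theorem pvStep2_cons (x : Char) (r : List Char) : pvStep2 (x :: r) = x :: pvStep2 r.tail := by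
  match r with
  | [] => rfl
  | y :: r2 => rfl

-- the even- and odd-position characters together are a permutation of the key
theorem pvStep2_perm : ∀ (cs : List Char), (pvStep2 cs ++ pvStep2 cs.tail).Perm cs := by
  intro cs
  induction cs using pvStep2.induct with
  | case1 => simp [pvStep2]
  | case2 a => simp [pvStep2]
  | case3 a b r ih =>
    show List.Perm ((a :: pvStep2 r) ++ pvStep2 (b :: r)) (a :: b :: r)
    rw [pvStep2_cons]
    refine List.Perm.cons a ?_
    exact (List.perm_middle).trans (List.Perm.cons b ih)

theorem pvZipEO : ∀ (cs : List Char),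
    ((pvStep2 cs).map pvS).zip ((pvStep2 cs.tail).map pvS)
      = (pvCP cs).map (fun p => (pvS p.1, pvS p.2)) := by
  intro cs
  induction cs using pvStep2.induct with
  | case1 => simp [pvStep2, pvCP]
  | case2 a => simp [pvStep2, pvCP]
  | case3 a b r ih =>
    show (((a :: pvStep2 r).map pvS).zip ((pvStep2 (b :: r)).map pvS)) = _
    rw [pvStep2_cons]
    simpa [pvCP] using ih

theorem pvZipOE : ∀ (cs : List Char),
    ((pvStep2 cs.tail).map pvS).zip ((pvStep2 cs).map pvS)
      = (pvCP cs).map (fun p => (pvS p.2, pvS p.1)) := by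
  intro cs
  induction cs using pvStep2.induct with
  | case1 => simp [pvStep2, pvCP]
  | case2 a => simp [pvStep2, pvCP]
  | case3 a b r ih =>
    show (((pvStep2 (b :: r)).map pvS).zip ((a :: pvStep2 r).map pvS)) = _
    rw [pvStep2_cons]
    simpa [pvCP] using ih

theorem pvCP_map_fst : ∀ (cs : List Char), cs.length % 2 = 0 →
    ((pvCP cs).map (fun p => (pvS p.1, pvS p.2))).map Prod.fst = (pvStep2 cs).map pvS := by
  intro cs
  induction cs using pvStep2.induct with
  | case1 => intro _; simp [pvStep2, pvCP]
  | case2 a => intro h; simp at h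
  | case3 a b r ih =>
    intro hlen
    have := ih (by simp at hlen ⊢; omega)
    simpa [pvCP, pvStep2] using this

theorem pvCP_map_snd : ∀ (cs : List Char),
    ((pvCP cs).map (fun p => (pvS p.2, pvS p.1))).map Prod.fst = (pvStep2 cs.tail).map pvS := by
  intro cs
  induction cs using pvStep2.induct with
  | case1 => simp [pvStep2, pvCP]
  | case2 a => simp [pvStep2, pvCP]
  | case3 a b r ih =>
    show _ = ((pvStep2 (b :: r)).map pvS)
    rw [pvStep2_cons]
    simpa [pvCP] using ih

-- the per-key comprehension over a dict whose lookups give the pair partners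
theorem pvMapChunk (pd : PySem.Dict String String) : ∀ (t : List Char), t.length % 2 = 0 →
    (∀ p ∈ pvCP t, pd.get? (pvS p.1) = some (pvS p.2) ∧ pd.get? (pvS p.2) = some (pvS p.1)) →
    t.map (fun c => (pvS c, (pd.get? (pvS c)).getD "")) = pvChunk t := by
  intro t
  induction t using pvStep2.induct with
  | case1 => intro _ _; simp [pvChunk, pvCP]
  | case2 a => intro h _; simp at h
  | case3 a b r ih =>
    intro hlen hmem
    have hhd := hmem (a, b) (by simp [pvCP])
    have htl : ∀ p ∈ pvCP r, pd.get? (pvS p.1) = some (pvS p.2) ∧ pd.get? (pvS p.2) = some (pvS p.1) := by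
      intro p hp; exact hmem p (by simp [pvCP, hp])
    have := ih (by simp at hlen ⊢; omega) htl
    simp [pvChunk, pvCP, hhd.1, hhd.2] at this ⊢
    exact this

-- ===== VERDICT (by name: the statement is the Claim_ definition above) =====
theorem wykonaj_klucz_spec : Claim_equal_wykonaj_klucz := by
  intro klucz _ hpre
  obtain ⟨hne, hnd, hev⟩ := hpre
  unfold Spec_wykonaj_klucz wykonaj_klucz wykonaj_klucz_alt
  set cs := klucz.toList with hcs
  have hset : PySem.Set.ofList cs = cs := PySem.Set.ofList_eq_self_of_nodup _ hnd
  have hguard : ¬ (cs.length = 0 ∨ (PySem.Set.ofList cs).length < cs.length ∨ cs.length % 2 = 1) := by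
    rw [hset]
    push Not
    exact ⟨by simpa [List.length_eq_zero_iff] using hne, le_refl _, by omega⟩
  simp only [if_neg hguard]
  simp only [show (fun c => String.ofList [c]) = pvS from rfl]
  -- A's side equals pvChunk cs
  have hA : ((PySem.List.enumerate cs (0 : Int)).foldl (fun d kv =>
      if PySem.Int.mod kv.1 2 = 0 then
        match PySem.List.pyGet? cs (kv.1 + 1) with
        | some c => d.insert (String.ofList [kv.2]) (String.ofList [c])
        | none => d
      else
        match PySem.List.pyGet? cs (kv.1 - 1) with
        | some c => d.insert (String.ofList [kv.2]) (String.ofList [c])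
        | none => d) (PySem.Dict.empty : PySem.Dict String String)).items = pvChunk cs := by
    have h := pvLoop_eq cs.length cs cs 0 PySem.Dict.empty (le_refl _) (by simp) hev (by norm_num)
    simp only [Nat.cast_zero] at h
    rw [h, pvPairLoop_items cs PySem.Dict.empty hnd (by intro c _; rfl)]
    simp [show (PySem.Dict.empty : PySem.Dict String String).items = [] from rfl]
  rw [hA]
  -- B's side: the partner dict
  set E := (pvStep2 cs).map pvS with hE
  set O := (pvStep2 cs.tail).map pvS with hO
  have hperm : (pvStep2 cs ++ pvStep2 cs.tail).Perm cs := pvStep2_perm cs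
  have hndEO : ((pvStep2 cs ++ pvStep2 cs.tail).map pvS).Nodup := by
    refine List.Nodup.map (fun x y h => pvS_inj h) (hperm.nodup_iff.mpr hnd)
  have hndEO' : (E ++ O).Nodup := by
    simpa [hE, hO, List.map_append] using hndEO
  set pd := (PySem.Dict.ofList (E.zip O)).update (O.zip E) with hpd
  -- items of pd
  have hofl : (PySem.Dict.ofList (E.zip O)).items
      = (pvCP cs).map (fun p => (pvS p.1, pvS p.2)) := by
    have h1 : PySem.Dict.ofList (E.zip O)
        = (E.zip O).foldl (fun d p => d.insert p.1 p.2) PySem.Dict.empty := rfl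
    have h2 := PySem.Dict.items_foldl_insert_fresh
      ((pvCP cs).map (fun p => (pvS p.1, pvS p.2))) Prod.fst Prod.snd
      (PySem.Dict.empty : PySem.Dict String String)
      (by intro p _; rfl)
      (by rw [pvCP_map_fst cs hev]
          exact (hndEO'.sublist (List.sublist_append_left _ _)))
    rw [h1, pvZipEO cs, h2]
    simp [show (PySem.Dict.empty : PySem.Dict String String).items = [] from rfl]

  have hkeys1 : (PySem.Dict.ofList (E.zip O)).keys = E := by
    simp only [PySem.Dict.keys, hofl]
    simpa using pvCP_map_fst cs hev
  have hdisj : ∀ x ∈ O, x ∉ E := by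
    intro x hx hxe
    exact (List.nodup_append.mp hndEO').2.2 x hxe x hx rfl
  have hitems : pd.items = (pvCP cs).map (fun p => (pvS p.1, pvS p.2))
      ++ (pvCP cs).map (fun p => (pvS p.2, pvS p.1)) := by
    have h1 : pd = (O.zip E).foldl (fun d p => d.insert p.1 p.2)
        (PySem.Dict.ofList (E.zip O)) := rfl
    have h2 := PySem.Dict.items_foldl_insert_fresh
      ((pvCP cs).map (fun p => (pvS p.2, pvS p.1))) Prod.fst Prod.snd
      (PySem.Dict.ofList (E.zip O))
      (by intro p hp
          have hpo : p.1 ∈ O := by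
            have : p.1 ∈ ((pvCP cs).map (fun p => (pvS p.2, pvS p.1))).map Prod.fst :=
              List.mem_map_of_mem hp
            rw [pvCP_map_snd cs] at this
            exact this
          rw [PySem.Dict.contains_eq_decide_mem_keys, hkeys1]
          simpa using hdisj _ hpo)
      (by rw [pvCP_map_snd cs]
          exact (hndEO'.sublist (List.sublist_append_right _ _)))
    rw [h1, pvZipOE cs, h2, hofl]
    simp
  have hkeys : pd.keys = E ++ O := by
    simp only [PySem.Dict.keys, hitems, List.map_append]
    rw [show ((pvCP cs).map (fun p => (pvS p.1, pvS p.2))).map (·.1)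
          = ((pvCP cs).map (fun p => (pvS p.1, pvS p.2))).map Prod.fst from rfl,
        show ((pvCP cs).map (fun p => (pvS p.2, pvS p.1))).map (·.1)
          = ((pvCP cs).map (fun p => (pvS p.2, pvS p.1))).map Prod.fst from rfl,
      pvCP_map_fst cs hev, pvCP_map_snd cs]
  have hkeysnd : pd.keys.Nodup := hkeys ▸ hndEO'
  have hlook : ∀ p ∈ pvCP cs, pd.get? (pvS p.1) = some (pvS p.2)
      ∧ pd.get? (pvS p.2) = some (pvS p.1) := by
    intro p hp
    constructor
    · exact PySem.Dict.get?_of_mem_items _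
        (by rw [hitems]; exact List.mem_append_left _ (List.mem_map_of_mem hp)) hkeysnd
    · exact PySem.Dict.get?_of_mem_items _
        (by rw [hitems]; exact List.mem_append_right _ (List.mem_map_of_mem hp)) hkeysnd
  have hsome : ∀ c ∈ cs, (pd.get? (pvS c)).isSome = true := by
    intro c hc
    have hmemk : pvS c ∈ pd.keys := by
      rw [hkeys]
      have h1 : c ∈ pvStep2 cs ++ pvStep2 cs.tail := hperm.mem_iff.mpr hc
      have h2 : pvS c ∈ (pvStep2 cs ++ pvStep2 cs.tail).map pvS := List.mem_map_of_mem h1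
      simpa [hE, hO, List.map_append] using h2
    have hct : pd.contains (pvS c) = true := by
      rw [PySem.Dict.contains_eq_decide_mem_keys]
      simpa using hmemk
    rw [← PySem.Dict.contains_eq_isSome_get?]
    exact hct
  have hBfold : (cs.foldl (fun d c =>
      match pd.get? (String.ofList [c]) with
      | some v => d.insert (String.ofList [c]) v
      | none => d) (PySem.Dict.empty : PySem.Dict String String))
      = cs.foldl (fun d c => d.insert (pvS c) ((pd.get? (pvS c)).getD ""))
          (PySem.Dict.empty : PySem.Dict String String) := by
    refine PySem.List.foldl_congr_mem cs _ _ _ ?_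
    intro d c hc
    have hs := hsome c hc
    rcases h : pd.get? (String.ofList [c]) with _ | v
    · rw [show pvS c = String.ofList [c] from rfl, h] at hs
      simp at hs
    · have hv : pd.get? (pvS c) = some v := h
      rw [show pvS c = String.ofList [c] from rfl, h]
      rfl
  have hfinal := PySem.Dict.items_foldl_insert_fresh cs (fun c => pvS c)
      (fun c => (pd.get? (pvS c)).getD "")
      (PySem.Dict.empty : PySem.Dict String String)
      (by intro a _; rfl)
      (List.Nodup.map (fun x y h => pvS_inj h) hnd)
  rw [hBfold, hfinal]
  simp only [show (PySem.Dict.empty : PySem.Dict String String).items = [] from rfl, List.nil_append]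
  exact (pvMapChunk pd cs hev hlook).symm
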